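-- pv_equiv track=rewrite | github.com/bmolparia/metaproteomics | file_processing/dta/parse_DTASelect_filter.py | retrieve_loci_noProtDB
-- ===== SOURCE A (Python) =====
-- def retrieve_loci_noProtDB(DTASelect_data):
--
-- 	'''
-- 	Takes DTASelect data block (for DTASelect-filter.txt file from data run with ProtDB OFF)
-- 	and returns chunks consisting of an identified locus and peptides from that locus (Forward and Reverse loci)
--
-- 	One chunk (as an example):
-- 	['61534251\t2\t15\t0.3%\t4485\t511792\t5.8\tU\t8.204104E-6\t0.0069316626\tno description',
-- 	'\t102214_SC_HEK293_25ug_HCD_FTMS_MS2_12.22000.22000.2\t1.7772602\t0.3232622\t99.2\t1588.8977\t1588.888\t88.0\t1\t10.185568\t11.1\t6\tR.HLSKLFDSLCKLK.F',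
-- 	'\t102214_SC_HEK293_25ug_HCD_FTMS_MS2_12.19162.19162.3\t2.3280215\t0.2957453\t99.8\t1589.9015\t1588.888\t88.0\t1\t8.6662245\t5.6\t9\tR.HLSKLFDSLCKLK.F']
--
-- 	Generator function
-- 	'''
--
-- 	loci = []
-- 	current_locus = []
-- 	for line in DTASelect_data[2:]: #skips column names on first 2 lines of data chunk
-- 		if not line.startswith('\t') and not line.startswith('*\t') and current_locus:
-- 			yield current_locus
-- 			current_locus = []
-- 			current_locus.append(line)
-- 		else:
-- 			current_locus.append(line)
-- 	else:
-- 		yield current_locus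
-- ===== SOURCE B (Python) =====
-- def retrieve_loci_noProtDB(DTASelect_data):
--     '''Group the data block (minus two header lines) into locus chunks,
--     built back-to-front: walk the lines in reverse, appending each line to the
--     chunk under construction and closing it whenever a locus (non-indented)
--     line is reached; chunks and their lines are un-reversed when yielded.
--     Generator function.'''
--     chunks = [[]]
--     for line in reversed(DTASelect_data[2:]):
--         chunks[-1].append(line)
--         if not line.startswith('\t') and not line.startswith('*\t'):
--             chunks.append([])
--     if chunks[-1] == [] and len(chunks) > 1:
--         chunks.pop()
--     for chunk in reversed(chunks):
--         yield chunk[::-1]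
-- ===== Notes on version B (the rewrite author's own statement) =====
-- stated objective: alternative
-- what changed: B builds the chunk list back-to-front with a reverse traversal that prepends each line to the front chunk and opens a new chunk above every locus line (dropping a leading empty chunk), instead of A's forward accumulator that yields the current chunk whenever a new locus line arrives.
import Mathlib
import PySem

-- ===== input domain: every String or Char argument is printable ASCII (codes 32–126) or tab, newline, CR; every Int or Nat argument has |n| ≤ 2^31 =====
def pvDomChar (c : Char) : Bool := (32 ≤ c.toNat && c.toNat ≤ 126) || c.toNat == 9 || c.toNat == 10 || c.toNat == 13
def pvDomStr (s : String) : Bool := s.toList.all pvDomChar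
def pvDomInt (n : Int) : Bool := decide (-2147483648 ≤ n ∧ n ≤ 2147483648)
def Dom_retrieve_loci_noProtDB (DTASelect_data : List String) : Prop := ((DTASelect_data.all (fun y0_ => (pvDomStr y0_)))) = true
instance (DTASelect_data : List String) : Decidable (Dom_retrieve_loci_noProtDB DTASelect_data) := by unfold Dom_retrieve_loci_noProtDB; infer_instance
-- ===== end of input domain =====

-- B groups the lines back-to-front (reverse traversal closing a chunk at each locus line,
-- un-reversing at the end) instead of A's forward accumulator; alternative decomposition.
-- Both Pythons are generators; equivalence is about the yielded sequence as a list.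

-- ===== PORT A =====
-- loop body of A: state (loci, current_locus); yields modelled by appending to loci
def pvAstep (st : List (List String) × List String) (line : String) :
    List (List String) × List String :=
  if (!(PySem.Str.startswith line "\t") && !(PySem.Str.startswith line "*\t")) && !st.2.isEmpty then
    (st.1 ++ [st.2], [line])
  else
    (st.1, st.2 ++ [line])

def retrieve_loci_noProtDB (DTASelect_data : List String) : List (List String) :=
  let r := (PySem.List.slice DTASelect_data (some 2) none).foldl pvAstep ([], [])
  r.1 ++ [r.2]

-- ===== PORT B =====
-- loop body of B: chunks[-1].append(line); if locus line: chunks.append([])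
def pvBstep (chunks : List (List String)) (line : String) : List (List String) :=
  let chunks := chunks.dropLast ++ [chunks.getLastD [] ++ [line]]
  if !(PySem.Str.startswith line "\t") && !(PySem.Str.startswith line "*\t") then
    chunks ++ [[]]
  else
    chunks

def retrieve_loci_noProtDB_alt (DTASelect_data : List String) : List (List String) :=
  -- for line in reversed(data): …
  let chunks := (PySem.List.slice DTASelect_data (some 2) none).reverse.foldl pvBstep [[]]
  -- if chunks[-1] == [] and len(chunks) > 1: chunks.pop()
  let chunks := if chunks.getLastD [] = [] ∧ 1 < chunks.length then chunks.dropLast else chunks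
  -- yield chunk[::-1] for chunk in reversed(chunks)   (s[::-1] = reverse)
  chunks.reverse.map (fun c => c.reverse)

-- ===== PRECONDITION & SPEC =====
def Spec_retrieve_loci_noProtDB (DTASelect_data : List String) (out : List (List String)) : Prop := out = retrieve_loci_noProtDB_alt DTASelect_data
instance (DTASelect_data : List String) (out : List (List String)) : Decidable (Spec_retrieve_loci_noProtDB DTASelect_data out) := by unfold Spec_retrieve_loci_noProtDB; infer_instance

-- ===== CLAIM (what is proved, stated in full; the proofs are below) =====
def Claim_equal_retrieve_loci_noProtDB : Prop := ∀ (DTASelect_data : List String), Dom_retrieve_loci_noProtDB DTASelect_data → Spec_retrieve_loci_noProtDB DTASelect_data (retrieve_loci_noProtDB DTASelect_data)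

-- ===== LEMMAS AND PROOFS =====

-- the boundary predicate ("this line starts a new locus"), shared condition of both loops
def pvB (line : String) : Bool :=
  !(PySem.Str.startswith line "\t") && !(PySem.Str.startswith line "*\t")

-- reference grouping: A's loop as plain structural recursion
def pvG : List String → List String → List (List String)
  | cur, [] => [cur]
  | cur, x :: xs => if pvB x && !cur.isEmpty then cur :: pvG [x] xs else pvG (cur ++ [x]) xs

-- head-based mirror of pvBstep: what pvBstep does, seen through reverse.map reverse
def pvHstep (line : String) (chunks : List (List String)) : List (List String) :=
  let chunks :=
    match chunks with
    | c :: rest => (line :: c) :: rest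
    | [] => [[line]]
  if pvB line then [] :: chunks else chunks

theorem pvAstep_eq (st : List (List String) × List String) (line : String) :
    pvAstep st line = if pvB line && !st.2.isEmpty then (st.1 ++ [st.2], [line])
      else (st.1, st.2 ++ [line]) := rfl

theorem pvHstep_ne (l : String) (ch : List (List String)) : pvHstep l ch ≠ [] := by
  unfold pvHstep
  cases ch <;> dsimp <;> split <;> simp

theorem foldr_pvHstep_ne (xs : List String) : xs.foldr pvHstep [[]] ≠ [] := by
  cases xs with
  | nil => simp
  | cons x xs => exact pvHstep_ne x _

theorem foldA_eq (xs : List String) : ∀ loci cur,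
    (xs.foldl pvAstep (loci, cur)).1 ++ [(xs.foldl pvAstep (loci, cur)).2] =
      loci ++ pvG cur xs := by
  induction xs with
  | nil => intro loci cur; simp [pvG]
  | cons x xs ih =>
    intro loci cur
    rw [List.foldl_cons, pvAstep_eq]
    cases hb : (pvB x && !cur.isEmpty) with
    | true =>
      rw [if_pos (by simp [hb])]
      rw [ih]
      simp [pvG, hb]
    | false =>
      rw [if_neg (by simp [hb])]
      rw [ih]
      simp [pvG, hb]

theorem pvG_eq_foldr (xs : List String) : ∀ cur p rest,
    xs.foldr pvHstep [[]] = p :: rest → cur ≠ [] →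
    pvG cur xs = (cur ++ p) :: rest := by
  induction xs with
  | nil =>
    intro cur p rest h _
    simp only [List.foldr_nil] at h
    cases h
    simp [pvG]
  | cons x xs ih =>
    intro cur p rest h hcur
    obtain ⟨p2, rest2, h2⟩ : ∃ p2 rest2, xs.foldr pvHstep [[]] = p2 :: rest2 := by
      cases hx : xs.foldr pvHstep [[]] with
      | nil => exact absurd hx (foldr_pvHstep_ne xs)
      | cons a b => exact ⟨a, b, rfl⟩
    have hcur' : cur.isEmpty = false := by
      cases cur with
      | nil => exact absurd rfl hcur
      | cons a b => rfl
    rw [List.foldr_cons, h2] at h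
    simp only [pvHstep] at h
    cases hb : pvB x with
    | true =>
      rw [if_pos hb] at h
      obtain ⟨hp, hrest⟩ := List.cons.inj h
      have hGx := ih [x] p2 rest2 h2 (by simp)
      simp only [pvG]
      rw [if_pos (by simp [hb, hcur']), hGx, ← hp, ← hrest]
      simp
    | false =>
      rw [if_neg (by simp [hb])] at h
      obtain ⟨hp, hrest⟩ := List.cons.inj h
      have hGx := ih (cur ++ [x]) p2 rest2 h2 (by simp)
      simp only [pvG]
      rw [if_neg (by simp [hb]), hGx, ← hp, ← hrest]
      simp

-- A's grouping equals the head-based right fold, after dropping a leading empty chunk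
theorem main_eq (data : List String) :
    pvG [] data = (match data.foldr pvHstep [[]] with
      | [] :: c :: rest => c :: rest
      | chunks => chunks) := by
  cases data with
  | nil => simp [pvG]
  | cons x xs =>
    obtain ⟨p2, rest2, h2⟩ : ∃ p2 rest2, xs.foldr pvHstep [[]] = p2 :: rest2 := by
      cases hx : xs.foldr pvHstep [[]] with
      | nil => exact absurd hx (foldr_pvHstep_ne xs)
      | cons a b => exact ⟨a, b, rfl⟩
    have hG : pvG ([] : List String) (x :: xs) = pvG [x] xs := by
      simp [pvG]
    have hGx := pvG_eq_foldr xs [x] p2 rest2 h2 (by simp)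
    rw [hG, hGx, List.foldr_cons, h2]
    simp only [pvHstep]
    cases hb : pvB x <;> simp [hb]

-- pvBstep seen through reverse.map reverse is pvHstep
theorem pvBstep_comm (ch : List (List String)) (line : String) :
    (pvBstep ch line).reverse.map (fun c => c.reverse) =
      pvHstep line (ch.reverse.map (fun c => c.reverse)) := by
  rcases List.eq_nil_or_concat ch with h | ⟨init, a, h⟩ <;> subst h <;>
    simp only [pvBstep, pvHstep, pvB, List.concat_eq_append] <;> split_ifs <;> simp

-- B's left fold over the reversed data, un-reversed, is the head-based right fold
theorem foldB_eq (data : List String) :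
    (data.reverse.foldl pvBstep [[]]).reverse.map (fun c => c.reverse) =
      data.foldr pvHstep [[]] := by
  rw [List.foldl_reverse]
  induction data with
  | nil => simp
  | cons x xs ih =>
    rw [List.foldr_cons, List.foldr_cons, pvBstep_comm, ih]

-- the pop-fixup, seen through reverse.map reverse, is the leading-empty-chunk drop
theorem fixup_eq (L : List (List String)) :
    ((if L.getLastD [] = [] ∧ 1 < L.length then L.dropLast else L).reverse.map
        (fun c => c.reverse)) =
      (match L.reverse.map (fun c => c.reverse) with
        | [] :: c :: rest => c :: rest
        | chunks => chunks) := by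
  rcases List.eq_nil_or_concat L with h | ⟨init, a, h⟩
  · subst h; simp
  · subst h
    cases a with
    | nil =>
      cases init with
      | nil => simp
      | cons i is =>
        simp only [List.concat_eq_append]
        rw [if_pos ⟨List.getLastD_concat, by simp⟩, List.dropLast_concat]
        cases hri : (i :: is).reverse with
        | nil => simp at hri
        | cons r rs =>
          have key : (List.map (fun c : List String => c.reverse) is).reverse ++ [i.reverse]
              = r.reverse :: List.map (fun c : List String => c.reverse) rs := by
            rw [show (List.map (fun c : List String => c.reverse) is).reverse ++ [i.reverse]
                = List.map (fun c : List String => c.reverse) ((i :: is).reverse) from by simp,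
              hri]
            rfl
          simp [key]
    | cons c cs =>
      rw [if_neg (by simp)]
      simp

-- ===== VERDICT (by name: the statement is the Claim_ definition above) =====
theorem retrieve_loci_noProtDB_spec : Claim_equal_retrieve_loci_noProtDB := by
  intro d _
  unfold Spec_retrieve_loci_noProtDB retrieve_loci_noProtDB retrieve_loci_noProtDB_alt
  have h := foldA_eq (PySem.List.slice d (some 2) none) [] []
  simp only [List.nil_append] at h
  rw [h, main_eq, fixup_eq, foldB_eq]
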